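-- pv_equiv track=rewrite | github.com/sosopop/deepcalc | calculator_ast.py | _add_positive
-- ===== SOURCE A (Python) =====
-- def _add_positive(a_pos, b_pos):
--     carry = 0
--     steps = []
--     temp_a, temp_b = a_pos, b_pos
--     while temp_a > 0 or temp_b > 0 or carry > 0:
--         digit_a = temp_a % 10
--         digit_b = temp_b % 10
--         total = digit_a + digit_b + carry
--         current = total % 10
--         new_carry = total // 10
--         steps.append(f"{current}{new_carry}")
--         carry = new_carry
--         temp_a //= 10
--         temp_b //= 10
--     if not steps:
--         steps.append("00")
--     digits = [s[0] for s in steps]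
--     result = int(''.join(reversed(digits)).lstrip('0') or '0')
--     return ';'.join(steps), result
-- ===== SOURCE B (Python) =====
-- def _add_positive(a_pos, b_pos):
--     sa, sb = str(a_pos), str(b_pos)
--     n = max(len(sa), len(sb))
--     sa = "0" * (n - len(sa)) + sa
--     sb = "0" * (n - len(sb)) + sb
--     carry = 0
--     steps = []
--     for ca, cb in zip(reversed(sa), reversed(sb)):
--         total = int(ca) + int(cb) + carry
--         carry = total // 10
--         steps.append(f"{total % 10}{carry}")
--     if carry:
--         steps.append(f"{carry}0")
--     digits = [s[0] for s in steps]
--     result = int(''.join(reversed(digits)).lstrip('0') or '0')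
--     return ';'.join(steps), result
-- ===== Notes on version B (the rewrite author's own statement) =====
-- stated objective: idiomatic
-- what changed: A repeatedly divmods the integers by 10 in an unbounded while loop; B converts both operands to decimal strings, zero-pads them to equal length, and folds once over the zipped reversed character lists with a single final carry step.
-- outside the precondition, e.g. on _add_positive(-1, -1): A returns ('00', 0), B raises ValueError
import Mathlib
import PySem

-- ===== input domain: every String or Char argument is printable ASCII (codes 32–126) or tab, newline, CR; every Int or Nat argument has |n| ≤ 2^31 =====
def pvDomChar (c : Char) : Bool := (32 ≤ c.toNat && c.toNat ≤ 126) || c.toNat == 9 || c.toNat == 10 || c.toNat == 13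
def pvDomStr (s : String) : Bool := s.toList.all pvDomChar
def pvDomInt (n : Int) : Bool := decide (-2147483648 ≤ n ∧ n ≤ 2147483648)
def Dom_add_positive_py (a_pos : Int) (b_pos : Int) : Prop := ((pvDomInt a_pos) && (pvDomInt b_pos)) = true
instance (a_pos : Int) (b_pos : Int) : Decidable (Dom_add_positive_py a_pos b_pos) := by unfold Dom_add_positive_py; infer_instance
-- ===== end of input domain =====

-- B replaces A's divmod-by-10 arithmetic loop with an idiomatic traversal of the zipped reversed
-- decimal-string representations of the operands; same steps string and sum on non-negative inputs.

-- ===== PORT A =====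
-- Python's `while` is unbounded (it diverges on mixed-sign inputs); the fuel only makes the same
-- computation total — 64 iterations cover every input admitted by Pre_ within Dom.
def addA_loop : Nat → Int → Int → Int → List (List Char) → List (List Char)
  | 0, _, _, _, steps => steps
  | fuel+1, temp_a, temp_b, carry, steps =>
    if temp_a > 0 ∨ temp_b > 0 ∨ carry > 0 then
      let digit_a := PySem.Int.mod temp_a 10
      let digit_b := PySem.Int.mod temp_b 10
      let total := digit_a + digit_b + carry
      let current := PySem.Int.mod total 10
      let new_carry := PySem.Int.floordiv total 10
      addA_loop fuel (PySem.Int.floordiv temp_a 10) (PySem.Int.floordiv temp_b 10) new_carry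
        (steps ++ [PySem.Int.toChars current ++ PySem.Int.toChars new_carry])
    else steps

def add_positive_py (a_pos : Int) (b_pos : Int) : String × Int :=
  let steps := addA_loop 64 a_pos b_pos 0 []
  let steps := if steps = [] then [['0', '0']] else steps
  let digits := steps.map (List.take 1)                       -- s[0] (every step string is nonempty)
  let joined := PySem.Chars.join [] digits.reverse            -- ''.join(reversed(digits))
  let stripped := joined.dropWhile (· == '0')                 -- .lstrip('0'), hand-ported (exact)
  -- int(...): the argument is a nonempty digit string, so ofChars? is always `some`
  let result := (PySem.Int.ofChars? (if stripped = [] then ['0'] else stripped)).getD 0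
  (String.ofList (PySem.Chars.join [';'] steps), result)

-- ===== PORT B =====
-- int(c) for a single char c; chars of str(n), n ≥ 0, are digits, so ofChars? is always `some`
def digitInt (c : Char) : Int := (PySem.Int.ofChars? [c]).getD 0

def addB_loop : List (Char × Char) → Int → List (List Char) → Int × List (List Char)
  | [], carry, steps => (carry, steps)
  | (ca, cb) :: rest, carry, steps =>
    let total := digitInt ca + digitInt cb + carry
    let new_carry := PySem.Int.floordiv total 10
    addB_loop rest new_carry (steps ++ [PySem.Int.toChars (PySem.Int.mod total 10) ++ PySem.Int.toChars new_carry])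

def add_positive_py_alt (a_pos : Int) (b_pos : Int) : String × Int :=
  let sa := PySem.Int.toChars a_pos
  let sb := PySem.Int.toChars b_pos
  let n := max sa.length sb.length
  let sa := List.replicate (n - sa.length) '0' ++ sa          -- "0" * (n - len(sa)) + sa
  let sb := List.replicate (n - sb.length) '0' ++ sb
  let p := addB_loop (List.zip sa.reverse sb.reverse) 0 []
  let steps := if p.1 ≠ 0 then p.2 ++ [PySem.Int.toChars p.1 ++ ['0']] else p.2
  let digits := steps.map (List.take 1)
  let joined := PySem.Chars.join [] digits.reverse
  let stripped := joined.dropWhile (· == '0')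
  let result := (PySem.Int.ofChars? (if stripped = [] then ['0'] else stripped)).getD 0
  (String.ofList (PySem.Chars.join [';'] steps), result)

-- ===== PRECONDITION & SPEC =====
-- Pre_ restricts to non-negative operands (the function is named _add_positive): outside it A's
-- floor-division arithmetic loops forever on mixed-sign inputs and returns an accidental ("00", 0)
-- when both operands are ≤ 0, while B's string conversion raises ValueError on any negative.
def Pre_add_positive_py (a_pos : Int) (b_pos : Int) : Prop := 0 ≤ a_pos ∧ 0 ≤ b_pos
instance (a_pos : Int) (b_pos : Int) : Decidable (Pre_add_positive_py a_pos b_pos) := by unfold Pre_add_positive_py; infer_instance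
def pvWitness_add_positive_py : Int × Int := (7, 5)

def Spec_add_positive_py (a_pos : Int) (b_pos : Int) (out : String × Int) : Prop := out = add_positive_py_alt a_pos b_pos
instance (a_pos : Int) (b_pos : Int) (out : String × Int) : Decidable (Spec_add_positive_py a_pos b_pos out) := by unfold Spec_add_positive_py; infer_instance

-- ===== CLAIM (what is proved, stated in full; the proofs are below) =====
def Claim_equal_add_positive_py : Prop := ∀ (a_pos : Int) (b_pos : Int), Dom_add_positive_py a_pos b_pos → Pre_add_positive_py a_pos b_pos → Spec_add_positive_py a_pos b_pos (add_positive_py a_pos b_pos)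

-- ===== LEMMAS AND PROOFS =====

-- the padded LSB-first digit-char list of k, width n (n at least the number of digits of k)
def padC (n : Nat) (k : Nat) : List Char :=
  (Nat.digits 10 k ++ List.replicate (n - (Nat.digits 10 k).length) 0).map Nat.digitChar

lemma toDigitsCore_eq (fuel : Nat) : ∀ (n : Nat) (acc : List Char), 0 < n → n ≤ fuel →
    Nat.toDigitsCore 10 fuel n acc = ((Nat.digits 10 n).map Nat.digitChar).reverse ++ acc := by
  induction fuel with
  | zero => intro n acc h1 h2; omega
  | succ f ih =>
    intro n acc h1 h2
    rw [Nat.toDigitsCore]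
    by_cases hz : n / 10 = 0
    · simp only [hz, if_pos]
      rw [Nat.digits_def' (by norm_num : 1 < 10) h1]
      have : Nat.digits 10 (n / 10) = [] := by rw [hz]; simp
      simp [this]
    · rw [if_neg hz, ih (n / 10) _ (Nat.pos_of_ne_zero hz) (by omega)]
      rw [Nat.digits_def' (by norm_num : 1 < 10) h1]
      simp

lemma toChars_natCast (k : Nat) (h : 0 < k) :
    PySem.Int.toChars (k : Int) = ((Nat.digits 10 k).map Nat.digitChar).reverse := by
  rw [PySem.Int.toChars]
  rw [if_neg (by omega)]
  simp only [Int.toNat_natCast]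
  rw [Nat.toDigits, toDigitsCore_eq (k+1) k [] h (by omega)]
  simp

lemma padC_rev (k n : Nat) (h : (PySem.Int.toChars (k : Int)).length ≤ n) :
    (PySem.Int.toChars (k : Int)).reverse ++ List.replicate (n - (PySem.Int.toChars (k : Int)).length) '0'
      = padC n k := by
  rcases Nat.eq_zero_or_pos k with hk | hk
  · subst hk
    have h0 : PySem.Int.toChars ((0:Nat) : Int) = ['0'] := rfl
    rw [h0] at h ⊢
    simp only [List.length_cons, List.length_nil] at h ⊢
    have : Nat.digits 10 0 = [] := by simp
    rw [padC, this]
    simp only [List.nil_append, List.length_nil, Nat.sub_zero, List.map_replicate]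
    have : Nat.digitChar 0 = '0' := rfl
    rw [this]
    rw [show n = 1 + (n - 1) by omega, List.replicate_add]
    simp [List.replicate_succ]
  · rw [toChars_natCast k hk, padC]
    simp [List.map_replicate]
    right; rfl

lemma padC_succ (n k : Nat) : padC (n+1) k = Nat.digitChar (k % 10) :: padC n (k / 10) := by
  rcases Nat.eq_zero_or_pos k with hk | hk
  · subst hk; simp [padC, List.replicate_succ]
  · rw [padC, padC, Nat.digits_def' (by norm_num : 1 < 10) hk]
    simp

lemma digitInt_digitChar (d : Nat) (h : d < 10) : digitInt (Nat.digitChar d) = (d : Int) := by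
  interval_cases d <;> rfl

lemma addB_loop_len (ps : List (Char × Char)) : ∀ (c : Int) (steps : List (List Char)),
    (addB_loop ps c steps).2.length = steps.length + ps.length := by
  induction ps with
  | nil => intro c steps; simp [addB_loop]
  | cons p rest ih =>
    intro c steps
    obtain ⟨ca, cb⟩ := p
    rw [addB_loop, ih]
    simp
    omega

lemma mod10_cast (x : Nat) : PySem.Int.mod (x : Int) 10 = ((x % 10 : Nat) : Int) := by
  rw [PySem.Int.mod_eq_emod_of_pos (by norm_num : (0:Int) < 10)]
  omega

lemma fdiv10_cast (x : Nat) : PySem.Int.floordiv (x : Int) 10 = ((x / 10 : Nat) : Int) := by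
  rw [PySem.Int.floordiv_eq_ediv_of_pos (by norm_num : (0:Int) < 10)]
  omega

-- the core correspondence: A's arithmetic loop equals B's digit-pair loop plus final-carry step
lemma core (m : Nat) : ∀ (ka kb c fuel : Nat) (steps : List (List Char)),
    ka < 10 ^ m → kb < 10 ^ m → (m = 0 ∨ 10 ^ (m-1) ≤ ka ∨ 10 ^ (m-1) ≤ kb) → c ≤ 1 →
    m + 2 ≤ fuel →
    addA_loop fuel (ka : Int) (kb : Int) (c : Int) steps =
      (let p := addB_loop (List.zip (padC m ka) (padC m kb)) (c : Int) steps
       if p.1 ≠ 0 then p.2 ++ [PySem.Int.toChars p.1 ++ ['0']] else p.2) := by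
  induction m with
  | zero =>
    intro ka kb c fuel steps hka hkb _ hc hfuel
    interval_cases ka
    interval_cases kb
    have hpad : padC 0 0 = [] := by simp [padC]
    rw [hpad]
    simp only [List.zip_nil_right, addB_loop]
    interval_cases c
    · obtain ⟨f, rfl⟩ : ∃ f, fuel = f + 1 := ⟨fuel - 1, by omega⟩
      rw [addA_loop, if_neg (by norm_num)]
      simp
    · obtain ⟨f, rfl⟩ : ∃ f, fuel = f + 1 := ⟨fuel - 1, by omega⟩
      rw [addA_loop, if_pos (by norm_num)]
      obtain ⟨f', rfl⟩ : ∃ f', f = f' + 1 := ⟨f - 1, by omega⟩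
      show addA_loop _ (PySem.Int.floordiv 0 10) (PySem.Int.floordiv 0 10) (PySem.Int.floordiv (PySem.Int.mod 0 10 + PySem.Int.mod 0 10 + 1) 10) (_ ++ [PySem.Int.toChars (PySem.Int.mod (PySem.Int.mod 0 10 + PySem.Int.mod 0 10 + 1) 10) ++ PySem.Int.toChars (PySem.Int.floordiv (PySem.Int.mod 0 10 + PySem.Int.mod 0 10 + 1) 10)]) = _
      rw [show PySem.Int.floordiv (PySem.Int.mod 0 10 + PySem.Int.mod 0 10 + 1) 10 = 0 from by decide,
          show PySem.Int.mod (PySem.Int.mod 0 10 + PySem.Int.mod 0 10 + 1) 10 = 1 from by decide,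
          show PySem.Int.floordiv 0 10 = 0 from by decide]
      rw [addA_loop, if_neg (by norm_num)]
      rfl
  | succ m ih =>
    intro ka kb c fuel steps hka hkb hmax hc hfuel
    have hpos : 0 < ka ∨ 0 < kb := by
      rcases hmax with h | h | h
      · omega
      · left; calc 0 < 10 ^ (m + 1 - 1) := Nat.pow_pos (by norm_num)
          _ ≤ ka := h
      · right; calc 0 < 10 ^ (m + 1 - 1) := Nat.pow_pos (by norm_num)
          _ ≤ kb := h
    obtain ⟨f, rfl⟩ : ∃ f, fuel = f + 1 := ⟨fuel - 1, by omega⟩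
    rw [addA_loop, if_pos (by rcases hpos with h | h; exacts [Or.inl (by exact_mod_cast Nat.cast_pos.mpr h), Or.inr (Or.inl (by exact_mod_cast Nat.cast_pos.mpr h))])]
    rw [padC_succ, padC_succ]
    simp only [List.zip_cons_cons, addB_loop]
    simp only [digitInt_digitChar _ (Nat.mod_lt _ (by norm_num)), mod10_cast, fdiv10_cast]
    have htot : ((ka % 10 : Nat) : Int) + ((kb % 10 : Nat) : Int) + (c : Int) = ((ka % 10 + kb % 10 + c : Nat) : Int) := by push_cast; ring
    rw [htot, mod10_cast, fdiv10_cast]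
    rw [ih (ka / 10) (kb / 10) ((ka % 10 + kb % 10 + c) / 10) f _
      (by rw [pow_succ] at hka; omega)
      (by rw [pow_succ] at hkb; omega)
      (by rcases Nat.eq_zero_or_pos m with hm | hm
          · exact Or.inl hm
          · rcases hmax with h | h | h
            · omega
            · refine Or.inr (Or.inl ?_)
              rw [Nat.le_div_iff_mul_le (by norm_num)]
              calc 10 ^ (m - 1) * 10 = 10 ^ m := by rw [← pow_succ]; congr 1; omega
                _ ≤ ka := by simpa using h
            · refine Or.inr (Or.inr ?_)
              rw [Nat.le_div_iff_mul_le (by norm_num)]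
              calc 10 ^ (m - 1) * 10 = 10 ^ m := by rw [← pow_succ]; congr 1; omega
                _ ≤ kb := by simpa using h)
      (by omega)
      (by omega)]

lemma lenChars (k : Nat) :
    (PySem.Int.toChars (k : Int)).length = if k = 0 then 1 else (Nat.digits 10 k).length := by
  rcases Nat.eq_zero_or_pos k with hk | hk
  · subst hk; rfl
  · rw [toChars_natCast k hk, if_neg (by omega)]
    simp

lemma padC_length (n k : Nat) (h : (Nat.digits 10 k).length ≤ n) : (padC n k).length = n := by
  simp [padC]
  omega

-- ===== VERDICT (by name: the statement is the Claim_ definition above) =====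
theorem add_positive_py_spec : Claim_equal_add_positive_py := by
  intro a b hdom hpre
  obtain ⟨ha, hb⟩ := hpre
  unfold Spec_add_positive_py
  by_cases h00 : a = 0 ∧ b = 0
  · obtain ⟨rfl, rfl⟩ := h00
    decide
  · obtain ⟨ka, rfl⟩ := Int.eq_ofNat_of_zero_le ha
    obtain ⟨kb, rfl⟩ := Int.eq_ofNat_of_zero_le hb
    have hk00 : ¬(ka = 0 ∧ kb = 0) := by
      intro ⟨h1, h2⟩; exact h00 (by subst h1; subst h2; exact ⟨rfl, rfl⟩)
    have hdom' : ka ≤ 2147483648 ∧ kb ≤ 2147483648 := by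
      unfold Dom_add_positive_py pvDomInt at hdom
      simp only [Bool.and_eq_true, decide_eq_true_eq] at hdom
      omega
    simp only [add_positive_py, add_positive_py_alt]
    set La := PySem.Int.toChars ((ka : Nat) : Int) with hLa
    set Lb := PySem.Int.toChars ((kb : Nat) : Int) with hLb
    set N := max La.length Lb.length with hN
    have hdlena : (Nat.digits 10 ka).length ≤ La.length := by
      rw [hLa, lenChars]
      split_ifs with h
      · subst h; simp
      · exact le_refl _
    have hdlenb : (Nat.digits 10 kb).length ≤ Lb.length := by
      rw [hLb, lenChars]
      split_ifs with h
      · subst h; simp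
      · exact le_refl _
    have hka' : ka < 10 ^ N := by
      rw [← Nat.digits_length_le_iff (by norm_num : 1 < 10)]
      exact le_trans hdlena (le_max_left _ _)
    have hkb' : kb < 10 ^ N := by
      rw [← Nat.digits_length_le_iff (by norm_num : 1 < 10)]
      exact le_trans hdlenb (le_max_right _ _)
    have hlen1a : 1 ≤ La.length := by
      rw [hLa, lenChars]; split_ifs with h
      · exact le_refl _
      · exact List.length_pos_of_ne_nil (Nat.digits_ne_nil_iff_ne_zero.mpr h)
    have hlen1b : 1 ≤ Lb.length := by
      rw [hLb, lenChars]; split_ifs with h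
      · exact le_refl _
      · exact List.length_pos_of_ne_nil (Nat.digits_ne_nil_iff_ne_zero.mpr h)
    have hN1 : 1 ≤ N := le_trans hlen1a (le_max_left _ _)
    have hNle : N ≤ 11 := by
      have la : La.length ≤ 11 := by
        rw [hLa, lenChars]; split_ifs with h
        · omega
        · have : ka < 10 ^ 11 := by omega
          rw [← Nat.digits_length_le_iff (by norm_num : 1 < 10)] at this
          omega
      have lb : Lb.length ≤ 11 := by
        rw [hLb, lenChars]; split_ifs with h
        · omega
        · have : kb < 10 ^ 11 := by omega
          rw [← Nat.digits_length_le_iff (by norm_num : 1 < 10)] at this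
          omega
      omega
    have hmax : N = 0 ∨ 10 ^ (N - 1) ≤ ka ∨ 10 ^ (N - 1) ≤ kb := by
      have low : ∀ k : Nat, 0 < k → 10 ^ ((Nat.digits 10 k).length - 1) ≤ k := by
        intro k hk
        by_contra hlt
        push Not at hlt
        rw [← Nat.digits_length_le_iff (by norm_num : 1 < 10)] at hlt
        have : (Nat.digits 10 k).length ≠ 0 := by
          simp [Nat.digits_ne_nil_iff_ne_zero, List.length_eq_zero_iff]
          omega
        omega
      rcases Nat.eq_zero_or_pos ka with hz | hp
      · -- ka = 0, so kb > 0 and La.length = 1 so N = Lb.length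
        have hkbp : 0 < kb := by omega
        right; right
        have : Lb.length = (Nat.digits 10 kb).length := by
          rw [hLb, lenChars, if_neg (by omega)]
        have hNe : N = (Nat.digits 10 kb).length := by
          rw [hN, this]
          have : La.length = 1 := by rw [hLa, hz, lenChars]; simp
          rw [this]
          have := hlen1b
          omega
        rw [hNe]
        exact low kb hkbp
      · rcases Nat.lt_or_ge La.length Lb.length with hlt | hle
        case inr =>
          right; left
          have hNe : N = (Nat.digits 10 ka).length := by
            rw [hN, max_eq_left hle, hLa, lenChars, if_neg (by omega)]
          rw [hNe]; exact low ka hp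
        case inl =>
          right; right
          have hkbp : 0 < kb := by
            by_contra hzz
            have : kb = 0 := by omega
            subst this
            have : Lb.length = 1 := by rw [hLb, lenChars]; simp
            omega
          have hNe : N = (Nat.digits 10 kb).length := by
            rw [hN, max_eq_right (le_of_lt hlt), hLb, lenChars, if_neg (by omega)]
          rw [hNe]; exact low kb hkbp
    have hrevA : (List.replicate (N - La.length) '0' ++ La).reverse = padC N ka := by
      rw [List.reverse_append, List.reverse_replicate, hLa, padC_rev _ _ (le_max_left _ _)]
    have hrevB : (List.replicate (N - Lb.length) '0' ++ Lb).reverse = padC N kb := by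
      rw [List.reverse_append, List.reverse_replicate, hLb, padC_rev _ _ (le_max_right _ _)]
    have hcore := core N ka kb 0 64 [] hka' hkb' hmax (by norm_num) (by omega)
    push_cast at hcore
    rw [hrevA, hrevB, hcore]
    set p := addB_loop (List.zip (padC N ka) (padC N kb)) 0 [] with hp
    have hplen : p.2.length = N := by
      rw [hp, addB_loop_len]
      simp [List.length_zip, padC_length N ka (le_trans hdlena (le_max_left _ _)),
            padC_length N kb (le_trans hdlenb (le_max_right _ _))]
    have hSne : (if p.1 ≠ 0 then p.2 ++ [PySem.Int.toChars p.1 ++ ['0']] else p.2) ≠ [] := by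
      split_ifs with h
      · simp
      · intro hcon
        rw [hcon] at hplen
        simp at hplen
        omega
    rw [if_neg hSne]
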